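-- pv_equiv track=rewrite | github.com/arthurmoreno/aetherion | src/aetherion/animation/dimetric.py | repartition_animation
-- ===== SOURCE A (Python) =====
-- import math
--
-- def repartition_animation(array: list[int], size: int) -> list[int]:
--     ratio = math.ceil(size / len(array))
--     animation_distributed: list[int] = []
--     array_index = 0
--     for i in range(1, size + 1):
--         animation_distributed.append(array[array_index])
--         if i != 0 and i % ratio == 0:
--             array_index += 1
--
--     return animation_distributed
-- ===== SOURCE B (Python) =====
-- import math
--
-- def repartition_animation(array: list[int], size: int) -> list[int]:
--     ratio = math.ceil(size / len(array))
--     result: list[int] = []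
--     for x in array:
--         result.extend([x] * ratio)
--     return result[:size]
-- ===== Notes on version B (the rewrite author's own statement) =====
-- stated objective: simpler
-- what changed: B iterates over the input array appending ratio copies of each element and trims the result to size, instead of A's walk over output positions with an incrementing source index driven by a modulo counter.
import Mathlib
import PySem

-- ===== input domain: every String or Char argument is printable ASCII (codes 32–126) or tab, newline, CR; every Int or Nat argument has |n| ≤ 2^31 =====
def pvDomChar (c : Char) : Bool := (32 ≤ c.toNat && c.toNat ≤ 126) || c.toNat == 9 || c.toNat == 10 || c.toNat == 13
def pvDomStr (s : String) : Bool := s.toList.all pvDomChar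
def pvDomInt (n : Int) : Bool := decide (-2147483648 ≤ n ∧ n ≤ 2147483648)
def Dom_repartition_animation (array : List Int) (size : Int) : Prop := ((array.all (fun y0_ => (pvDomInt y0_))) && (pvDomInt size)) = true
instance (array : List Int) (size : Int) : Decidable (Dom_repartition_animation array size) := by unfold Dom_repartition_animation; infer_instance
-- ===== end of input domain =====

-- B replaces A's walk over output positions (with an incrementing source index driven by a
-- modulo counter) by a loop over the input array appending ratio copies of each element and
-- trimming to size; objective: simpler.

-- ===== PORT A =====
-- math.ceil(size / len(array)) ported as the exact integer ceiling -((-size) // n); exact on Dom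
-- (|size| ≤ 2^31: the float quotient cannot round across an integer at these magnitudes).
def repartition_animation (array : List Int) (size : Int) : List Int :=
  let ratio : Int := -(PySem.Int.floordiv (-size) (array.length : Int))
  let st := (PySem.List.pyRange 1 (size + 1) 1).foldl
    (fun (s : List Int × Int) i =>
      (s.1 ++ [PySem.List.pyGetD array s.2 0],   -- array[array_index]; always in range under Pre_
       if i ≠ 0 ∧ PySem.Int.mod i ratio = 0 then s.2 + 1 else s.2)) ([], 0)
  st.1

-- ===== PORT B =====
def repartition_animation_alt (array : List Int) (size : Int) : List Int :=
  let ratio : Int := -(PySem.Int.floordiv (-size) (array.length : Int))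
  let result := array.foldl (fun acc x => acc ++ PySem.List.pyRepeat [x] ratio) []
  PySem.List.slice result none (some size)

-- ===== PRECONDITION & SPEC =====
-- Pre_ excludes only the empty array, on which both Pythons raise ZeroDivisionError in ceil(size/len(array)).
def Pre_repartition_animation (array : List Int) (size : Int) : Prop := array ≠ []
instance (array : List Int) (size : Int) : Decidable (Pre_repartition_animation array size) := by unfold Pre_repartition_animation; infer_instance

def pvWitness_repartition_animation : List Int × Int := ([3, 1, 4], 7)

def Spec_repartition_animation (array : List Int) (size : Int) (out : List Int) : Prop := out = repartition_animation_alt array size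
instance (array : List Int) (size : Int) (out : List Int) : Decidable (Spec_repartition_animation array size out) := by unfold Spec_repartition_animation; infer_instance

-- ===== CLAIM (what is proved, stated in full; the proofs are below) =====
def Claim_equal_repartition_animation : Prop := ∀ (array : List Int) (size : Int), Dom_repartition_animation array size → Pre_repartition_animation array size → Spec_repartition_animation array size (repartition_animation array size)

-- ===== LEMMAS AND PROOFS =====

-- element p of array repeated r-per-element is element p / r of array
lemma getD_flatMap_replicate (array : List Int) (r : ℕ) (hr : 0 < r) :
    ∀ (p : ℕ), p < array.length * r →
      (array.flatMap (fun x => List.replicate r x)).getD p 0 = array.getD (p / r) 0 := by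
  induction array with
  | nil => intro p hp; simp at hp
  | cons a tl ih =>
    intro p hp
    by_cases hpr : p < r
    · have hlt : p < (List.replicate r a).length := by simpa using hpr
      rw [Nat.div_eq_of_lt hpr, List.flatMap_cons, List.getD_append _ _ _ _ hlt]
      simp [List.getD, hpr]
    · push_neg at hpr
      have h1 : (List.replicate r a).length ≤ p := by simpa using hpr
      rw [List.flatMap_cons, List.getD_append_right _ _ _ _ h1, List.length_replicate]
      rw [Nat.div_eq_sub_div hr hpr]
      have hexp : (tl.length + 1) * r = tl.length * r + r := by ring
      have := ih (p - r) (by simp at hp; omega)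
      simpa using this

-- B's block-repeated list, truncated, as a map over output positions
lemma take_flatMap_replicate (array : List Int) (r s : ℕ) (hr : 0 < r)
    (hs : s ≤ array.length * r) :
    (array.flatMap (fun x => List.replicate r x)).take s
      = (List.range s).map (fun p => array.getD (p / r) 0) := by
  have hlen : (array.flatMap (fun x => List.replicate r x)).length = array.length * r := by
    simp [List.length_flatMap, List.map_const', mul_comm]
  apply List.ext_getElem
  · rw [List.length_take, hlen, List.length_map, List.length_range]; omega
  · intro i h1 h2
    have hi : i < s := by simpa using h2
    have hilen : i < (array.flatMap (fun x => List.replicate r x)).length := by omega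
    rw [List.getElem_take, List.getElem_map, List.getElem_range,
      ← List.getD_eq_getElem _ 0 hilen, getD_flatMap_replicate array r hr i (by omega)]

-- A's loop invariant: after the first k output positions the accumulator holds
-- array.getD (p / r) 0 for p < k and the source index is k / r
lemma loopA (array : List Int) (r : ℕ) (k : ℕ) :
    (PySem.List.pyRange 1 ((k : Int) + 1) 1).foldl
      (fun (s : List Int × Int) i =>
        (s.1 ++ [PySem.List.pyGetD array s.2 0],
         if i ≠ 0 ∧ PySem.Int.mod i ((r : ℕ) : Int) = 0 then s.2 + 1 else s.2)) ([], 0)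
      = ((List.range k).map (fun p => array.getD (p / r) 0), ((k / r : ℕ) : Int)) := by
  induction k with
  | zero => simp [PySem.List.pyRange_one_eq_nil (by omega : (1:Int) ≤ 1)]
  | succ k ih =>
    have hstep : ((k : Int) + 1 + 1) = (((k : Int) + 1) + 1) := by ring
    rw [show (((k+1 : ℕ) : Int) + 1) = (((k : Int) + 1) + 1) by push_cast; ring,
      PySem.List.pyRange_one_succ_right (by omega : (1:Int) ≤ (k : Int) + 1),
      List.foldl_append, ih]
    have hmod : PySem.Int.mod ((k : Int) + 1) ((r : ℕ) : Int)
        = (((k + 1) % r : ℕ) : Int) := by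
      rw [show ((k : Int) + 1) = (((k + 1 : ℕ)) : Int) by push_cast; ring]
      exact PySem.Int.mod_natCast (k + 1) r
    simp only [List.foldl_cons, List.foldl_nil, hmod]
    rw [Prod.mk.injEq]
    have hne : ((k : Int) + 1) ≠ 0 := by omega
    constructor
    · rw [List.range_succ, List.map_append, PySem.List.pyGetD_natCast]
      simp [List.getD]
    · rw [Nat.succ_div]
      by_cases hd : r ∣ k + 1
      · have hm : (k + 1) % r = 0 := Nat.dvd_iff_mod_eq_zero.mp hd
        simp [hne, hm, hd]
      · have hm : (k + 1) % r ≠ 0 := fun h => hd (Nat.dvd_of_mod_eq_zero h)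
        have hid : ¬ ((r : Int) ∣ (k : Int) + 1) := by
          rw [show ((k : Int) + 1) = (((k + 1 : ℕ)) : Int) by push_cast; ring]
          exact fun h => hd (Int.natCast_dvd_natCast.mp h)
        simp [hne, hd, hid]

-- ===== VERDICT (by name: the statement is the Claim_ definition above) =====
theorem repartition_animation_spec : Claim_equal_repartition_animation := by
  intro array size _ hpre
  unfold Spec_repartition_animation repartition_animation repartition_animation_alt
  have hn : 0 < (array.length : Int) := by
    have := List.length_pos_iff.mpr hpre
    exact_mod_cast this
  set ratio : Int := -(PySem.Int.floordiv (-size) (array.length : Int)) with hratio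
  have hbounds : (ratio - 1) * (array.length : Int) < size ∧ size ≤ ratio * (array.length : Int) :=
    (PySem.Int.neg_floordiv_neg_eq_iff_of_pos hn).mp hratio.symm
  by_cases hpos : 0 < size
  · -- size ≥ 1: r := ratio ≥ 1 and the output has exactly size positions
    have hr1 : 1 ≤ ratio := by
      by_contra h
      push_neg at h
      have : ratio * (array.length : Int) ≤ 0 :=
        mul_nonpos_of_nonpos_of_nonneg (by omega) (by omega)
      omega
    set r : ℕ := ratio.toNat with hrdef
    have hrc : ((r : ℕ) : Int) = ratio := Int.toNat_of_nonneg (by omega)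
    set s : ℕ := size.toNat with hsdef
    have hsc : ((s : ℕ) : Int) = size := Int.toNat_of_nonneg (by omega)
    have hA := loopA array r s
    rw [hrc, hsc] at hA
    simp only [hA]
    rw [PySem.List.foldl_append_eq_flatMap, List.nil_append,
      PySem.List.slice_to _ (by omega : (0:Int) ≤ size)]
    have : (fun x => PySem.List.pyRepeat [x] ratio) = (fun x : Int => List.replicate r x) := by
      funext x; rw [PySem.List.pyRepeat_singleton]
    rw [this]
    have hsle : s ≤ array.length * r := by
      have h2 := hbounds.2
      rw [← hrc, ← hsc] at h2
      exact_mod_cast le_of_le_of_eq h2 (mul_comm _ _)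
    rw [show size.toNat = s from rfl]
    exact (take_flatMap_replicate array r s (by omega) hsle).symm
  · -- size ≤ 0: both sides are []
    push_neg at hpos
    have hAnil : PySem.List.pyRange 1 (size + 1) 1 = [] :=
      PySem.List.pyRange_one_eq_nil (by omega)
    have hr0 : ratio ≤ 0 := by
      by_contra h
      push_neg at h
      have : 0 ≤ (ratio - 1) * (array.length : Int) :=
        mul_nonneg (by omega) (by omega)
      omega
    have hrep : (fun x => PySem.List.pyRepeat [x] ratio) = (fun _ : Int => ([] : List Int)) := by
      funext x
      rw [PySem.List.pyRepeat_singleton]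
      simp [Int.toNat_of_nonpos hr0]
    have hnil : List.flatMap (fun x => PySem.List.pyRepeat [x] ratio) array = [] := by
      rw [hrep]; simp
    simp only [hAnil, List.foldl_nil, PySem.List.foldl_append_eq_flatMap, List.nil_append, hnil]
    simp [PySem.List.slice, PySem.List.clampIdx]
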